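-- pv_equiv track=rewrite | github.com/joni911/Whisper-Transcriber | ai_reporter.py | basic_clean_for_pdf
-- ===== SOURCE A (Python) =====
-- def basic_clean_for_pdf(content: str) -> str:
--     # Normalisasi line ending
--     content = content.replace('\r\n', '\n').replace('\r', '\n')
--
--     cleaned_content = ""
--     for char in content:
--         if ord(char) >= 32 or char in '\n\r\t':
--             cleaned_content += char
--         else:
--             cleaned_content += ' '
--     return cleaned_content.strip()
-- ===== SOURCE B (Python) =====
-- def basic_clean_for_pdf(content: str) -> str:
--     # One fused scan: normalize CR/CRLF to LF and blank out other control
--     # characters in a single pass with one-character lookahead.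
--     out = []
--     i, n = 0, len(content)
--     while i < n:
--         c = content[i]
--         if c == '\r':
--             out.append('\n')
--             if i + 1 < n and content[i + 1] == '\n':
--                 i += 1
--         elif c == '\n' or c == '\t' or ord(c) >= 32:
--             out.append(c)
--         else:
--             out.append(' ')
--         i += 1
--     return ''.join(out).strip()
-- ===== Notes on version B (the rewrite author's own statement) =====
-- stated objective: alternative
-- what changed: A makes three passes (two whole-string replace calls to normalize line endings, then a char loop substituting controls); B is a single fused index scan with one-character lookahead that folds CR/CRLF normalization and control-char substitution into one pass over the original string.
import Mathlib
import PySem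

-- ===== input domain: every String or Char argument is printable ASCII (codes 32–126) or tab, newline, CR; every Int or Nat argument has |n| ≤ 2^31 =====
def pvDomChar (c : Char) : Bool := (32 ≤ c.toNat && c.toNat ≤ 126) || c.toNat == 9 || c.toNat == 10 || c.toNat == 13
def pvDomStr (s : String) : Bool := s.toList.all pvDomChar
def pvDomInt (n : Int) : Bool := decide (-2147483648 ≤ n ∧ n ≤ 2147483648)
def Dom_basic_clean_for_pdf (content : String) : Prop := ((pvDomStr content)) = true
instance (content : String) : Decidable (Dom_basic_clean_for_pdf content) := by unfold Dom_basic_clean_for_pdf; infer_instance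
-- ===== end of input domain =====

-- B fuses A's three passes (two replace calls + a char loop) into one scan with
-- a one-character lookahead; alternative decomposition, same cost.

-- ===== PORT A =====
-- two replace passes normalizing line endings, then a char-by-char loop
def basic_clean_for_pdf (content : String) : String :=
  let content1 := PySem.Str.replace (PySem.Str.replace content "\r\n" "\n") "\r" "\n"
  let cleaned : List Char := content1.toList.foldl
    (fun acc c => if 32 ≤ c.toNat ∨ c ∈ ['\n', '\r', '\t'] then acc ++ [c] else acc ++ [' ']) []
  PySem.Str.strip (String.mk cleaned)

-- ===== PORT B =====
-- Source B's while loop over the index i: the state is the remaining suffix of the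
-- string; the `i + 1 < n and content[i+1] == '\n'` lookahead (which then skips
-- one extra position) is the head of that suffix
def pvScan (l : List Char) : List Char :=
  match l with
  | [] => []
  | c :: rest =>
    if c = '\r' then '\n' :: pvScan (if rest.head? = some '\n' then rest.tail else rest)
    else if c = '\n' ∨ c = '\t' ∨ 32 ≤ c.toNat then c :: pvScan rest
    else ' ' :: pvScan rest
termination_by l.length
decreasing_by
  · split <;> simp [List.length_tail]
  · simp
  · simp

def basic_clean_for_pdf_alt (content : String) : String :=
  PySem.Str.strip (String.mk (pvScan content.toList))

-- ===== PRECONDITION & SPEC =====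
def Spec_basic_clean_for_pdf (content : String) (out : String) : Prop := out = basic_clean_for_pdf_alt content
instance (content : String) (out : String) : Decidable (Spec_basic_clean_for_pdf content out) := by unfold Spec_basic_clean_for_pdf; infer_instance

-- ===== CLAIM (what is proved, stated in full; the proofs are below) =====
def Claim_equal_basic_clean_for_pdf : Prop := ∀ (content : String), Dom_basic_clean_for_pdf content → Spec_basic_clean_for_pdf content (basic_clean_for_pdf content)

-- ===== LEMMAS AND PROOFS =====

-- the first replace pass ('\r\n' -> '\n') as a structural recursion
def pvF1 (l : List Char) : List Char :=
  match l with
  | [] => []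
  | c :: rest =>
    if c = '\r' ∧ rest.head? = some '\n' then '\n' :: pvF1 rest.tail
    else c :: pvF1 rest
termination_by l.length
decreasing_by
  · simp [List.length_tail]
  · simp

-- the second replace pass ('\r' -> '\n') is a per-character map
def pvF2c (c : Char) : Char := if c = '\r' then '\n' else c

-- A's loop body as a per-character function
def pvCleanA (c : Char) : Char := if 32 ≤ c.toNat ∨ c ∈ ['\n', '\r', '\t'] then c else ' '

theorem pvGo_crlf (fuel : Nat) (l acc : List Char) (h : l.length ≤ fuel) :
    PySem.Chars.replace.go ['\r', '\n'] ['\n'] fuel l acc = acc.reverse ++ pvF1 l := by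
  induction fuel generalizing l acc with
  | zero =>
    cases l with
    | nil => rw [pvF1]; simp [PySem.Chars.replace.go]
    | cons c t => simp at h
  | succ fuel ih =>
    cases l with
    | nil => rw [pvF1]; simp [PySem.Chars.replace.go]
    | cons c t =>
      rw [PySem.Chars.replace.go]
      by_cases hpre : c = '\r' ∧ t.head? = some '\n'
      · obtain ⟨hc, hh⟩ := hpre
        subst hc
        obtain ⟨t', rfl⟩ : ∃ t', t = '\n' :: t' := by
          cases t with
          | nil => simp at hh
          | cons d t' => simp at hh; subst hh; exact ⟨t', rfl⟩
        have hp : ['\r', '\n'].isPrefixOf ('\r' :: '\n' :: t') = true := by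
          simp [List.isPrefixOf]
        rw [hp, if_pos rfl,
          show List.drop ['\r', '\n'].length ('\r' :: '\n' :: t') = t' from rfl,
          show ['\n'].reverse ++ acc = '\n' :: acc from rfl,
          ih t' ('\n' :: acc) (by simp at h ⊢; omega)]
        rw [pvF1, if_pos (by simp)]
        simp
      · have hp : ['\r', '\n'].isPrefixOf (c :: t) = false := by
          cases t with
          | nil => simp [List.isPrefixOf]
          | cons d t' =>
            simp [List.isPrefixOf]
            intro hc hd
            exact hpre ⟨hc.symm, by simp [hd.symm]⟩
        rw [hp]
        simp only [Bool.false_eq_true, if_false]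
        rw [ih t (c :: acc) (by simp at h ⊢; omega)]
        rw [pvF1, if_neg hpre]
        simp

theorem pvReplace_crlf (l : List Char) :
    PySem.Chars.replace l ['\r', '\n'] ['\n'] = pvF1 l := by
  rw [PySem.Chars.replace]
  simp only [List.isEmpty_cons, Bool.false_eq_true, if_false]
  simpa using pvGo_crlf l.length l [] le_rfl

theorem pvGo_cr (fuel : Nat) (l acc : List Char) (h : l.length ≤ fuel) :
    PySem.Chars.replace.go ['\r'] ['\n'] fuel l acc = acc.reverse ++ l.map pvF2c := by
  induction fuel generalizing l acc with
  | zero =>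
    cases l with
    | nil => simp [PySem.Chars.replace.go]
    | cons c t => simp at h
  | succ fuel ih =>
    cases l with
    | nil => simp [PySem.Chars.replace.go]
    | cons c t =>
      rw [PySem.Chars.replace.go]
      by_cases hc : c = '\r'
      · subst hc
        have hp : ['\r'].isPrefixOf ('\r' :: t) = true := by simp [List.isPrefixOf]
        rw [hp, if_pos rfl,
          show List.drop ['\r'].length ('\r' :: t) = t from rfl,
          show ['\n'].reverse ++ acc = '\n' :: acc from rfl,
          ih t ('\n' :: acc) (by simp at h ⊢; omega)]
        simp [pvF2c]
      · have hp : ['\r'].isPrefixOf (c :: t) = false := by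
          simp [List.isPrefixOf]
          exact fun h => hc h.symm
        rw [hp]
        simp only [Bool.false_eq_true, if_false]
        rw [ih t (c :: acc) (by simp at h ⊢; omega)]
        simp [pvF2c, hc]

theorem pvReplace_cr (l : List Char) :
    PySem.Chars.replace l ['\r'] ['\n'] = l.map pvF2c := by
  rw [PySem.Chars.replace]
  simp only [List.isEmpty_cons, Bool.false_eq_true, if_false]
  simpa using pvGo_cr l.length l [] le_rfl

-- the fused scan equals A's three passes composed
theorem pvScan_eq (l : List Char) :
    pvScan l = ((pvF1 l).map pvF2c).map pvCleanA := by
  induction l using pvScan.induct with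
  | case1 => rw [pvScan, pvF1]; simp
  | case2 rest ih =>
    rw [pvScan, if_pos rfl, pvF1]
    by_cases hh : rest.head? = some '\n' <;>
      simp only [hh, reduceCtorEq, dite_true, dite_false, if_true, if_false,
        reduceIte, true_and, and_true, and_false, false_and] at ih ⊢ <;>
      simp [pvF2c, pvCleanA, ih]
  | case3 c rest hc hkeep ih =>
    rw [pvScan, if_neg hc, if_pos hkeep, pvF1,
      if_neg (by intro hp; exact hc hp.1)]
    have h1 : pvCleanA (pvF2c c) = c := by
      rw [pvF2c, if_neg hc, pvCleanA]
      rcases hkeep with h | h | h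
      · subst h; simp
      · subst h; simp
      · simp [h]
    simp [h1, ih]
  | case4 c rest hc hkeep ih =>
    rw [pvScan, if_neg hc, if_neg hkeep, pvF1,
      if_neg (by intro hp; exact hc hp.1)]
    push_neg at hkeep
    obtain ⟨h1, h2, h3⟩ := hkeep
    have h4 : pvCleanA (pvF2c c) = ' ' := by
      rw [pvF2c, if_neg hc, pvCleanA, if_neg]
      push_neg
      refine ⟨by omega, ?_⟩
      simp [h1, h2, hc]
    simp [h4, ih]

-- ===== VERDICT (by name: the statement is the Claim_ definition above) =====
theorem basic_clean_for_pdf_spec : Claim_equal_basic_clean_for_pdf := by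
  intro content _
  unfold Spec_basic_clean_for_pdf basic_clean_for_pdf basic_clean_for_pdf_alt
  dsimp only
  refine congrArg PySem.Str.strip (congrArg String.mk ?_)
  rw [show (fun (acc : List Char) (c : Char) =>
        if 32 ≤ c.toNat ∨ c ∈ ['\n', '\r', '\t'] then acc ++ [c] else acc ++ [' '])
      = fun acc c => acc ++ [pvCleanA c] from
    funext fun acc => funext fun c => by rw [pvCleanA]; split <;> rfl]
  rw [PySem.List.foldl_append_singleton_eq_map,
    PySem.Str.toList_replace, PySem.Str.toList_replace,
    show "\r\n".toList = ['\r', '\n'] from rfl, show "\r".toList = ['\r'] from rfl,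
    show "\n".toList = ['\n'] from rfl,
    pvReplace_crlf, pvReplace_cr, pvScan_eq, List.nil_append]
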